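-- pv_equiv track=rewrite | github.com/Lucas-d-Barbosa/CursoPython | aula88_exercicio_set.py | retornar_duplicados
-- ===== SOURCE A (Python) =====
-- def retornar_duplicados(lista):
--     list_inteiros_duplicados = []
--
--     for i in lista:
--
--         tamanho_lista = len(list_inteiros_duplicados)
--         numeros_duplicados = set()
--
--         for j in i:
--             teste = set((j,))
--             if numeros_duplicados.intersection(teste):
--                 list_inteiros_duplicados.append(j)
--                 break
--
--             numeros_duplicados.add(j)
--         if tamanho_lista == len(list_inteiros_duplicados):
--             list_inteiros_duplicados.append(-1)
--     return list_inteiros_duplicados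
-- ===== SOURCE B (Python) =====
-- def retornar_duplicados(lista):
--     def primeiro_duplicado(sub):
--         best = None  # (second_occurrence_index, value)
--         for v in set(sub):
--             if sub.count(v) > 1:
--                 first = sub.index(v)
--                 second = first + 1 + sub[first + 1:].index(v)
--                 if best is None or second < best[0]:
--                     best = (second, v)
--         return best[1] if best is not None else -1
--     return [primeiro_duplicado(sub) for sub in lista]
-- ===== Notes on version B (the rewrite author's own statement) =====
-- stated objective: alternative
-- what changed: Instead of A's left-to-right scan with a seen-set, break and length sentinel, B iterates over the distinct values of each sublist, computes for each value occurring at least twice the index of its second occurrence via index(), and returns the value with the smallest such index (argmin), or -1 if no value repeats.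
import Mathlib
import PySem

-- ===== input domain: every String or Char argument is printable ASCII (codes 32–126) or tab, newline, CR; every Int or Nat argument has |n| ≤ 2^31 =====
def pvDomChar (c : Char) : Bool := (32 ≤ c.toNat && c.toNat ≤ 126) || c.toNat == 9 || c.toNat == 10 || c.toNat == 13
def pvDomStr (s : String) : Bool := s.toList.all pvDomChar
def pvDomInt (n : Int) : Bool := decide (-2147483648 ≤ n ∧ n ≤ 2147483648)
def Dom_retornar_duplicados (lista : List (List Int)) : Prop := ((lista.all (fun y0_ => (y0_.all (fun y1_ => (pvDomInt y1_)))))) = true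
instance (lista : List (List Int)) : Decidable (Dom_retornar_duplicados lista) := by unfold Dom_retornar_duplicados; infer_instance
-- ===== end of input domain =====

-- B replaces A's single seen-set scan with break and length sentinel by a per-sublist
-- argmin over distinct values: each value occurring twice contributes its second-occurrence
-- index and the value with the smallest such index wins (alternative algorithm, not faster).


-- ===== PORT A =====
-- inner 'for j in i' loop: teste = set((j,)), truthy intersection test; 'break' = some j
def pvLoopA : List Int → PySem.Set Int → Option Int
  | [], _ => none
  | j :: rest, numeros_duplicados =>
    let teste := PySem.Set.ofList [j]
    if PySem.Set.inter numeros_duplicados teste ≠ [] then some j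
    else pvLoopA rest (PySem.Set.add numeros_duplicados j)

def retornar_duplicados (lista : List (List Int)) : List Int :=
  lista.foldl (fun list_inteiros_duplicados i =>
    let tamanho_lista := list_inteiros_duplicados.length
    let acc' := match pvLoopA i PySem.Set.empty with
      | some j => list_inteiros_duplicados ++ [j]   -- break after append
      | none => list_inteiros_duplicados
    if tamanho_lista = acc'.length then acc' ++ [-1] else acc') []

-- ===== PORT B =====
-- 'for v in set(sub)' = fold over PySem.Set.ofList sub; best : Option (second_index, value).
-- sub.index(v) / sub[first+1:].index(v) are guarded by count > 1, so index? is always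
-- some there and '.getD 0' is exact; the slice sub[first+1:] is PySem.List.slice with a
-- nonnegative start.
def pvStepB (sub : List Int) (best : Option (Nat × Int)) (v : Int) : Option (Nat × Int) :=
  if sub.count v > 1 then
    let first := (PySem.List.index? sub v).getD 0
    let second := first + 1 +
      ((PySem.List.index? (PySem.List.slice sub (some ((first : Int) + 1)) none) v).getD 0)
    match best with
    | none => some (second, v)
    | some b => if second < b.1 then some (second, v) else best
  else best

def primeiro_duplicado (sub : List Int) : Int :=
  match (PySem.Set.ofList sub).foldl (pvStepB sub) none with
  | some b => b.2
  | none => -1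

def retornar_duplicados_alt (lista : List (List Int)) : List Int :=
  lista.map primeiro_duplicado

-- ===== PRECONDITION & SPEC =====
def Spec_retornar_duplicados (lista : List (List Int)) (out : List Int) : Prop := out = retornar_duplicados_alt lista
instance (lista : List (List Int)) (out : List Int) : Decidable (Spec_retornar_duplicados lista out) := by unfold Spec_retornar_duplicados; infer_instance

-- ===== CLAIM (what is proved, stated in full; the proofs are below) =====
def Claim_equal_retornar_duplicados : Prop := ∀ (lista : List (List Int)), Dom_retornar_duplicados lista → Spec_retornar_duplicados lista (retornar_duplicados lista)

-- ===== LEMMAS AND PROOFS =====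

-- the truthiness test on 'numeros_duplicados & {j}' is exactly 'j ∈ numeros_duplicados'
lemma pvInter_singleton_ne (s : PySem.Set Int) (j : Int) :
    (PySem.Set.inter s (PySem.Set.ofList [j]) ≠ []) ↔ j ∈ s := by
  rw [Ne, List.eq_nil_iff_forall_not_mem]
  push Not
  constructor
  · rintro ⟨y, hy⟩
    rw [PySem.Set.mem_inter] at hy
    obtain ⟨h1, h2⟩ := hy
    rw [PySem.Set.mem_ofList] at h2
    simp at h2
    exact h2 ▸ h1
  · intro h
    exact ⟨j, by rw [PySem.Set.mem_inter, PySem.Set.mem_ofList]; simp [h]⟩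

-- proof-side index scan: first k in ks with sub[k] ∈ sub[:k]
def pvGoB (sub : List Int) : List Nat → Int
  | [] => -1
  | k :: ks => if sub.getD k 0 ∈ sub.take k then sub.getD k 0 else pvGoB sub ks

-- A's seen-set scan over the suffix agrees with the index scan over the same suffix
lemma pvKey (rest pre : List Int) :
    (match pvLoopA rest (PySem.Set.ofList pre) with | some j => j | none => (-1 : Int))
      = pvGoB (pre ++ rest) (List.range' pre.length rest.length) := by
  induction rest generalizing pre with
  | nil => simp [pvLoopA, pvGoB]
  | cons j rs ih =>
    rw [List.length_cons, List.range'_succ, pvGoB]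
    have hget : (pre ++ j :: rs).getD pre.length 0 = j := by
      rw [List.getD_eq_getElem?_getD, List.getElem?_append_right le_rfl]
      simp
    have htake : (pre ++ j :: rs).take pre.length = pre := List.take_left ..
    rw [hget, htake, pvLoopA]
    simp only [pvInter_singleton_ne, PySem.Set.mem_ofList]
    by_cases h : j ∈ pre
    · simp [h]
    · simp only [h, if_false]
      have := ih (pre ++ [j])
      rw [PySem.Set.ofList_append_singleton] at this
      simpa [List.append_assoc] using this

lemma pvSublistA (sub : List Int) :
    (match pvLoopA sub PySem.Set.empty with | some j => j | none => (-1 : Int))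
      = pvGoB sub (List.range sub.length) := by
  have := pvKey sub []
  simpa [List.range_eq_range', PySem.Set.empty] using this

-- A's loop body appends exactly the scan's value
lemma pvStepA (acc : List Int) (i : List Int) :
    (let tamanho_lista := acc.length
     let acc' := match pvLoopA i PySem.Set.empty with
       | some j => acc ++ [j]
       | none => acc
     if tamanho_lista = acc'.length then acc' ++ [-1] else acc')
      = acc ++ [pvGoB i (List.range i.length)] := by
  have h := pvSublistA i
  cases hl : pvLoopA i PySem.Set.empty with
  | some j => rw [hl] at h; simp at h; simp [h]
  | none => rw [hl] at h; simp at h; simp [h]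

lemma pvFoldA (lista : List (List Int)) (acc : List Int) :
    lista.foldl (fun list_inteiros_duplicados i =>
      let tamanho_lista := list_inteiros_duplicados.length
      let acc' := match pvLoopA i PySem.Set.empty with
        | some j => list_inteiros_duplicados ++ [j]
        | none => list_inteiros_duplicados
      if tamanho_lista = acc'.length then acc' ++ [-1] else acc') acc
    = acc ++ lista.map (fun i => pvGoB i (List.range i.length)) := by
  induction lista generalizing acc with
  | nil => simp
  | cons i rest ih =>
    rw [List.foldl_cons, pvStepA, ih, List.map_cons]
    simp

-- ---- B side ----

lemma pvGoB_eq_find (sub : List Int) (ks : List Nat) :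
    pvGoB sub ks = match ks.find? (fun k => decide (sub.getD k 0 ∈ sub.take k)) with
      | some k => sub.getD k 0
      | none => -1 := by
  induction ks with
  | nil => simp [pvGoB]
  | cons k ks ih =>
    rw [pvGoB, List.find?_cons]
    by_cases h : sub.getD k 0 ∈ sub.take k
    · rw [if_pos h, decide_eq_true h]
    · rw [if_neg h, decide_eq_false h, ih]

-- the second-occurrence index used by B (slice already reduced to drop)
def pvSec (sub : List Int) (v : Int) : Nat :=
  let first := (PySem.List.index? sub v).getD 0
  first + 1 + ((PySem.List.index? (sub.drop (first + 1)) v).getD 0)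

lemma pvStepB_eq (sub : List Int) (best : Option (Nat × Int)) (v : Int) :
    pvStepB sub best v =
      if sub.count v > 1 then
        match best with
        | none => some (pvSec sub v, v)
        | some b => if pvSec sub v < b.1 then some (pvSec sub v, v) else best
      else best := by
  have hs : PySem.List.slice sub (some (((PySem.List.index? sub v).getD 0 : Int) + 1)) none
      = sub.drop ((PySem.List.index? sub v).getD 0 + 1) := by
    have := PySem.List.slice_from_natCast (xs := sub) (a := (PySem.List.index? sub v).getD 0 + 1)
    simpa using this
  simp only [pvStepB, pvSec, hs]

-- pvSec v is a duplicate index carrying v, minimal among indices k with sub[k] = v ∧ v ∈ sub[:k]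
lemma pvSec_spec (sub : List Int) (v : Int) (hc : sub.count v > 1) :
    pvSec sub v < sub.length ∧ sub.getD (pvSec sub v) 0 = v ∧
    v ∈ sub.take (pvSec sub v) ∧
    (∀ k, k < sub.length → sub.getD k 0 = v → v ∈ sub.take k → pvSec sub v ≤ k) := by
  have hmem : v ∈ sub := List.count_pos_iff.1 (by omega)
  obtain ⟨f, hf⟩ := Option.isSome_iff_exists.1 ((PySem.List.index?_isSome_iff sub v).2 hmem)
  obtain ⟨hflt, hfv, hfmin⟩ := PySem.List.getElem_of_index?_eq_some hf
  have hcnt : (sub.take (f+1)).count v = 1 := by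
    have htk : sub.take (f+1) = sub.take f ++ [sub[f]] := List.take_succ_eq_append_getElem hflt
    have h0 : (sub.take f).count v = 0 := by
      rw [List.count_eq_zero]
      intro hmem'
      obtain ⟨j, hj, hjv⟩ := List.getElem_of_mem hmem'
      have hjlen : j < f := by rw [List.length_take] at hj; omega
      exact hfmin j hjlen (by rw [← hjv, List.getElem_take])
    rw [htk, List.count_append, h0, hfv]
    simp
  have hsplit : sub.count v = (sub.take (f+1)).count v + (sub.drop (f+1)).count v := by
    conv_lhs => rw [← List.take_append_drop (f+1) sub]
    rw [List.count_append]
  have hmem2 : v ∈ sub.drop (f+1) := List.count_pos_iff.1 (by omega)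
  obtain ⟨g, hg⟩ := Option.isSome_iff_exists.1 ((PySem.List.index?_isSome_iff (sub.drop (f+1)) v).2 hmem2)
  obtain ⟨hglt, hgv, hgmin⟩ := PySem.List.getElem_of_index?_eq_some hg
  have hsec : pvSec sub v = f + 1 + g := by
    simp only [pvSec, PySem.List.index?_eq_idxOf?] at hf hg ⊢
    rw [hf, Option.getD_some, hg, Option.getD_some]
  have hlen : f + 1 + g < sub.length := by
    have := hglt; simp [List.length_drop] at this; omega
  refine ⟨by rw [hsec]; exact hlen, ?_, ?_, ?_⟩
  · rw [hsec, List.getD_eq_getElem _ _ hlen, ← hgv, List.getElem_drop]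
  · rw [hsec]
    exact List.mem_take_iff_getElem.2 ⟨f, by simp; omega, hfv⟩
  · intro k hk hkv hktk
    obtain ⟨j, hj, hjv⟩ := List.getElem_of_mem hktk
    have hjlen : j < k := by rw [List.length_take] at hj; omega
    have hjv' : sub[j]'(by omega) = v := by rw [← hjv, List.getElem_take]
    have hfj : f ≤ j := by
      by_contra hlt
      exact hfmin j (by omega) hjv'
    have hfk : f + 1 ≤ k := by omega
    have hkd : (sub.drop (f+1))[k - (f+1)]'(by simp; omega) = v := by
      rw [List.getElem_drop]
      rw [← List.getD_eq_getElem _ _ (by omega : f + 1 + (k - (f+1)) < sub.length)] at *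
      have : f + 1 + (k - (f+1)) = k := by omega
      rw [this]; exact hkv
    have : g ≤ k - (f+1) := by
      by_contra hlt
      exact hgmin (k - (f+1)) (by omega) hkd
    omega

-- a duplicate index k has count (sub[k]) > 1
lemma pvDup_count (sub : List Int) (k : Nat) (hk : k < sub.length)
    (hmem : sub.getD k 0 ∈ sub.take k) : sub.count (sub.getD k 0) > 1 := by
  set v := sub.getD k 0 with hv
  have hvk : v = sub[k] := by rw [hv, List.getD_eq_getElem]
  have h1 : 0 < (sub.take k).count v := List.count_pos_iff.2 hmem
  have h2 : 0 < (sub.drop k).count v := by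
    apply List.count_pos_iff.2
    rw [hvk]
    exact List.mem_drop_iff_getElem.2 ⟨0, by simpa using hk, by simp⟩
  have hc : sub.count v = (sub.take k).count v + (sub.drop k).count v := by
    conv_lhs => rw [← List.take_append_drop k sub]
    rw [List.count_append]
  omega

-- what B's fold maintains: the result is a candidate (pvSec v, v), it is below every
-- candidate of the processed values, and it never exceeds the incoming best
lemma pvFoldB_spec (sub : List Int) (L : List Int) (best : Option (Nat × Int)) :
    (L.foldl (pvStepB sub) best = best ∨
      ∃ v ∈ L, sub.count v > 1 ∧ L.foldl (pvStepB sub) best = some (pvSec sub v, v)) ∧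
    (∀ v ∈ L, sub.count v > 1 → ∃ b, L.foldl (pvStepB sub) best = some b ∧ b.1 ≤ pvSec sub v) ∧
    (∀ b0, best = some b0 → ∃ b, L.foldl (pvStepB sub) best = some b ∧ b.1 ≤ b0.1) := by
  induction L generalizing best with
  | nil =>
    refine ⟨Or.inl rfl, by simp, fun b0 h => ⟨b0, h, le_rfl⟩⟩
  | cons v L ih =>
    rw [List.foldl_cons]
    obtain ⟨ih1, ih2, ih3⟩ := ih (pvStepB sub best v)
    have hstep : (pvStepB sub best v = best ∧ ¬ sub.count v > 1) ∨
        (sub.count v > 1 ∧ ∃ b, pvStepB sub best v = some b ∧ b.1 ≤ pvSec sub v ∧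
          (b = (pvSec sub v, v) ∨ best = some b) ∧
          (∀ b0, best = some b0 → b.1 ≤ b0.1)) := by
      rw [pvStepB_eq]
      by_cases hc : sub.count v > 1
      · right
        refine ⟨hc, ?_⟩
        cases best with
        | none =>
          exact ⟨(pvSec sub v, v), by simp [hc], le_refl _, Or.inl rfl, fun b0 h => by cases h⟩
        | some b0 =>
          by_cases hlt : pvSec sub v < b0.1
          · exact ⟨(pvSec sub v, v), by simp [hc, hlt], le_refl _, Or.inl rfl,
              fun b1 h => by rw [Option.some_inj] at h; subst h; omega⟩
          · exact ⟨b0, by simp [hc, hlt], by omega, Or.inr rfl,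
              fun b1 h => by rw [Option.some_inj] at h; subst h; exact le_rfl⟩
      · exact Or.inl ⟨by simp [hc], hc⟩
    refine ⟨?_, ?_, ?_⟩
    · rcases hstep with ⟨h, _⟩ | ⟨hc, b, hb, hble, hbor, hbmin⟩
      · rw [h] at ih1 ⊢; exact ih1.imp id (fun ⟨w, hw, h1, h2⟩ => ⟨w, List.mem_cons_of_mem _ hw, h1, h2⟩)
      · rcases ih1 with h1 | ⟨w, hw, h1, h2⟩
        · rw [h1, hb]
          rcases hbor with rfl | hbest
          · exact Or.inr ⟨v, List.mem_cons_self, hc, rfl⟩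
          · exact Or.inl (hbest ▸ rfl)
        · exact Or.inr ⟨w, List.mem_cons_of_mem _ hw, h1, h2⟩
    · intro w hw hwc
      rcases List.mem_cons.1 hw with rfl | hwL
      · rcases hstep with ⟨_, hnc⟩ | ⟨hc, b, hb, hble, _, _⟩
        · exact absurd hwc hnc
        · obtain ⟨b', hb', hle'⟩ := ih3 b hb
          exact ⟨b', hb', le_trans hle' hble⟩
      · exact ih2 w hwL hwc
    · intro b0 hbest
      rcases hstep with ⟨h, _⟩ | ⟨hc, b, hb, hble, hbor, hbmin⟩
      · exact ih3 b0 (h.trans hbest)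
      · obtain ⟨b', hb', hle'⟩ := ih3 b hb
        exact ⟨b', hb', le_trans hle' (hbmin b0 hbest)⟩

-- find? on a strictly increasing list returns the least satisfying element
lemma pvFind_min {p : Nat → Bool} {l : List Nat} (hl : l.Pairwise (· < ·)) {k0 : Nat}
    (h : l.find? p = some k0) : ∀ m ∈ l, p m → k0 ≤ m := by
  induction l with
  | nil => simp at h
  | cons a t ih =>
    rw [List.find?_cons] at h
    intro m hm hpm
    cases hpa : p a with
    | true =>
      rw [hpa] at h; simp at h; subst h
      rcases List.mem_cons.1 hm with rfl | hmt
      · exact le_rfl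
      · exact le_of_lt (List.rel_of_pairwise_cons hl hmt)
    | false =>
      rw [hpa] at h; simp at h
      rcases List.mem_cons.1 hm with rfl | hmt
      · rw [hpm] at hpa; cases hpa
      · exact ih (List.Pairwise.of_cons hl) h m hmt hpm

-- per-sublist agreement: A's scan = B's argmin over distinct values
lemma pvSublist_eq (sub : List Int) :
    pvGoB sub (List.range sub.length) = primeiro_duplicado sub := by
  rw [pvGoB_eq_find, primeiro_duplicado]
  cases hfind : (List.range sub.length).find? (fun k => decide (sub.getD k 0 ∈ sub.take k)) with
  | none =>
    have hno : ∀ k, k < sub.length → sub.getD k 0 ∉ sub.take k := by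
      intro k hk hmem
      have := List.find?_eq_none.1 hfind k (List.mem_range.2 hk)
      simp at this
      exact this hmem
    have hnone : (PySem.Set.ofList sub).foldl (pvStepB sub) none = none := by
      rcases (pvFoldB_spec sub (PySem.Set.ofList sub) none).1 with h | ⟨v, hv, hc, h⟩
      · exact h
      · obtain ⟨hlt, hval, htk, _⟩ := pvSec_spec sub v hc
        exact absurd (show sub.getD (pvSec sub v) 0 ∈ sub.take (pvSec sub v) by rw [hval]; exact htk)
          (hno _ hlt)
    rw [hnone]
  | some k0 =>
    have hk0mem : k0 < sub.length := List.mem_range.1 (List.mem_of_find?_eq_some hfind)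
    have hk0p : sub.getD k0 0 ∈ sub.take k0 := by
      have := List.find?_some hfind; simpa using this
    have hmin := pvFind_min (List.pairwise_lt_range) hfind
    have hc0 : sub.count (sub.getD k0 0) > 1 := pvDup_count sub k0 hk0mem hk0p
    have hv0mem : sub.getD k0 0 ∈ PySem.Set.ofList sub := by
      rw [PySem.Set.mem_ofList, List.getD_eq_getElem _ _ hk0mem]
      exact List.getElem_mem _
    obtain ⟨hfold1, hfold2, _⟩ := pvFoldB_spec sub (PySem.Set.ofList sub) none
    obtain ⟨b, hb, hble⟩ := hfold2 _ hv0mem hc0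
    rcases hfold1 with h | ⟨v, hv, hc, h⟩
    · rw [h] at hb; cases hb
    · rw [h] at hb ⊢
      rw [Option.some_inj] at hb; subst hb
      obtain ⟨hslt, hsval, hstk, _⟩ := pvSec_spec sub v hc
      obtain ⟨_, _, _, s0min⟩ := pvSec_spec sub (sub.getD k0 0) hc0
      have h1 : pvSec sub (sub.getD k0 0) ≤ k0 := s0min k0 hk0mem rfl hk0p
      have h2 : k0 ≤ pvSec sub v :=
        hmin _ (List.mem_range.2 hslt) (by simp only [decide_eq_true_eq]; rw [hsval]; exact hstk)
      have heq : pvSec sub v = k0 := by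
        simp only at hble
        omega
      rw [← hsval, heq]
-- ===== VERDICT (by name: the statement is the Claim_ definition above) =====
theorem retornar_duplicados_spec : Claim_equal_retornar_duplicados := by
  intro lista _
  unfold Spec_retornar_duplicados retornar_duplicados retornar_duplicados_alt
  rw [pvFoldA lista []]
  simp [List.map_congr_left (fun i _ => pvSublist_eq i)]
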